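-- pv_equiv track=rewrite | github.com/abarbosa94/elo7Challenge | challenge/agenda/functions/methods.py | calculate_lower_size
-- ===== SOURCE A (Python) =====
-- def calculate_lower_size(contacts):
-- 	lowest_size = -1;
-- 	lowest_name = '';
-- 	for people in contacts:
-- 		tmp = people.replace(" ","")
-- 		current_size = len(tmp)
-- 		if(lowest_size == -1):
-- 			lowest_size = current_size
-- 			lowest_name = people;
-- 		else:
-- 			if lowest_size>current_size:
-- 				lowest_size = current_size
-- 				lowest_name = people;
-- 	return (lowest_size, str(lowest_name))
-- ===== SOURCE B (Python) =====
-- def calculate_lower_size(contacts):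
--     ordered = sorted(contacts, key=lambda p: len(p.replace(" ", "")))
--     if not ordered:
--         return (-1, '')
--     lowest = ordered[0]
--     return (len(lowest.replace(" ", "")), str(lowest))
-- ===== Notes on version B (the rewrite author's own statement) =====
-- stated objective: alternative
-- what changed: Replaces A's manual running-minimum loop with a sentinel size by a stable sort on the space-stripped length and taking the first element; stability reproduces A's first-wins tie behaviour.
import Mathlib
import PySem

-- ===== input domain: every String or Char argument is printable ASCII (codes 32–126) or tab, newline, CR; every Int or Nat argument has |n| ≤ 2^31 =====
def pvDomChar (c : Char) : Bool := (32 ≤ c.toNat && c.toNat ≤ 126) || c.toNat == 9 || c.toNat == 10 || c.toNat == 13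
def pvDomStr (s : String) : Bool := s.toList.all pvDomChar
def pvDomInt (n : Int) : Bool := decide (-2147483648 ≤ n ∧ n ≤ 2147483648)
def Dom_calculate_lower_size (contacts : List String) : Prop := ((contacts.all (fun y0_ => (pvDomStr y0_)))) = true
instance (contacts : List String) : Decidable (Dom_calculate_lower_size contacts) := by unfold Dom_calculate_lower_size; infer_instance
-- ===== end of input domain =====

-- B replaces A's manual running-minimum loop (with a -1 sentinel) by a stable sort on the
-- space-stripped length and taking the first element; an alternative decomposition, not faster.


-- ===== PORT A =====
-- aStep is A's loop body, verbatim
def aStep (acc : Int × String) (people : String) : Int × String :=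
  let tmp := PySem.Str.replace people " " ""
  let current_size : Int := PySem.Str.len tmp
  if acc.1 == -1 then (current_size, people)
  else if acc.1 > current_size then (current_size, people)
  else acc

def calculate_lower_size (contacts : List String) : Int × String :=
  contacts.foldl aStep ((-1 : Int), "")

-- ===== PORT B =====
-- the sort key: len(p.replace(" ", ""))
def pvKey (p : String) : Int := PySem.Str.len (PySem.Str.replace p " " "")

def calculate_lower_size_alt (contacts : List String) : Int × String :=
  let ordered := PySem.List.sorted contacts pvKey
  match ordered with
  | [] => ((-1 : Int), "")
  | lowest :: _ => (PySem.Str.len (PySem.Str.replace lowest " " ""), lowest)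

-- ===== PRECONDITION & SPEC =====
def Spec_calculate_lower_size (contacts : List String) (out : Int × String) : Prop := out = calculate_lower_size_alt contacts
instance (contacts : List String) (out : Int × String) : Decidable (Spec_calculate_lower_size contacts out) := by unfold Spec_calculate_lower_size; infer_instance

-- ===== CLAIM (what is proved, stated in full; the proofs are below) =====
def Claim_equal_calculate_lower_size : Prop := ∀ (contacts : List String), Dom_calculate_lower_size contacts → Spec_calculate_lower_size contacts (calculate_lower_size contacts)

-- ===== LEMMAS AND PROOFS =====

-- the first-wins running minimum both programs compute
def pvMinStep (m p : String) : String := if pvKey p < pvKey m then p else m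

theorem pvKey_nonneg (p : String) : 0 ≤ pvKey p := by
  simp [pvKey, PySem.Str.len]

theorem aStep_min (m p : String) :
    aStep (pvKey m, m) p = (pvKey (pvMinStep m p), pvMinStep m p) := by
  have hne : (pvKey m == (-1 : Int)) = false := by
    have := pvKey_nonneg m
    simp only [beq_eq_false_iff_ne, ne_eq]
    omega
  show (if (pvKey m == -1) = true then (pvKey p, p)
        else if pvKey p < pvKey m then (pvKey p, p) else (pvKey m, m))
      = (pvKey (pvMinStep m p), pvMinStep m p)
  rw [hne]
  simp only [Bool.false_eq_true, if_false, pvMinStep]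
  split_ifs with h <;> rfl

-- A's loop, after the first element, is the running minimum
theorem aLoop (t : List String) (m : String) :
    t.foldl aStep (pvKey m, m)
    = (pvKey (t.foldl pvMinStep m), t.foldl pvMinStep m) := by
  induction t generalizing m with
  | nil => rfl
  | cons p t ih =>
      rw [List.foldl_cons, aStep_min, ih, List.foldl_cons]

-- the head of the insertion-sort accumulator is the running minimum
theorem headFoldl (t : List String) (h : String) (tl : List String) :
    ∃ tl', t.foldl
        (fun acc x => PySem.List.insertBy (fun a b => decide (pvKey a < pvKey b)) x acc)
        (h :: tl)
      = (t.foldl pvMinStep h) :: tl' := by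
  induction t generalizing h tl with
  | nil => exact ⟨tl, rfl⟩
  | cons p t ih =>
      simp only [List.foldl_cons, PySem.List.insertBy]
      by_cases hlt : pvKey p < pvKey h
      · simp only [hlt, decide_true, if_true, pvMinStep]
        exact ih p (h :: tl)
      · simp only [hlt, decide_false, if_false, pvMinStep]
        exact ih h _

-- ===== VERDICT (by name: the statement is the Claim_ definition above) =====
theorem calculate_lower_size_spec : Claim_equal_calculate_lower_size := by
  intro contacts _
  unfold Spec_calculate_lower_size
  cases contacts with
  | nil => rfl
  | cons x t =>
      obtain ⟨tl', htl⟩ := headFoldl t x []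
      have hs : PySem.List.sorted (x :: t) pvKey = (t.foldl pvMinStep x) :: tl' := by
        rw [PySem.List.sorted_eq_foldl_insertBy]
        simpa [PySem.List.insertBy] using htl
      have hfirst : aStep ((-1 : Int), "") x = (pvKey x, x) := by
        simp [aStep, pvKey]
      have hA : calculate_lower_size (x :: t)
          = (pvKey (t.foldl pvMinStep x), t.foldl pvMinStep x) := by
        rw [calculate_lower_size, List.foldl_cons, hfirst, aLoop]
      rw [hA]
      simp [calculate_lower_size_alt, hs, pvKey]
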